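-- pv_equiv track=rewrite | github.com/GundalaNikhil/DSA | dsa-problems/Bitwise/testcases/generate_all_testcases.py | bit012_distinct_subarray_xors
-- ===== SOURCE A (Python) =====
-- from typing import List, Dict, Any
--
-- def bit012_distinct_subarray_xors(a: List[int]) -> int:
--     """BIT-012: Distinct Subarray XORs"""
--     xor_set = set()
--     n = len(a)
--     for i in range(n):
--         xor_val = 0
--         for j in range(i, n):
--             xor_val ^= a[j]
--             xor_set.add(xor_val)
--     return len(xor_set)
-- ===== SOURCE B (Python) =====
-- from typing import List, Dict, Any
--
-- def bit012_distinct_subarray_xors(a: List[int]) -> int: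
--     """BIT-012: Distinct Subarray XORs via deduplicated prefix XORs.
--
--     Every subarray XOR is p_i ^ p_j for two prefix-XOR values with i < j.
--     Nonzero answers come from pairs of DISTINCT prefix values; 0 is an
--     answer exactly when some prefix value repeats.
--     """
--     prefs = {0}
--     cur = 0
--     for x in a:
--         cur ^= x
--         prefs.add(cur)
--     u = list(prefs)
--     res = set()
--     for i in range(len(u)):
--         for j in range(i + 1, len(u)):
--             res.add(u[i] ^ u[j])
--     if len(prefs) < len(a) + 1:
--         res.add(0)
--     return len(res)
-- ===== Notes on version B (the rewrite author's own statement) =====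
-- stated objective: alternative
-- what changed: Replaces the nested subarray scan with prefix-XOR deduplication: collect the set U of distinct prefix XORs, take pairwise XORs of distinct elements of U, and add 0 exactly when a prefix value repeats (|U| < n+1).
import Mathlib
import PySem

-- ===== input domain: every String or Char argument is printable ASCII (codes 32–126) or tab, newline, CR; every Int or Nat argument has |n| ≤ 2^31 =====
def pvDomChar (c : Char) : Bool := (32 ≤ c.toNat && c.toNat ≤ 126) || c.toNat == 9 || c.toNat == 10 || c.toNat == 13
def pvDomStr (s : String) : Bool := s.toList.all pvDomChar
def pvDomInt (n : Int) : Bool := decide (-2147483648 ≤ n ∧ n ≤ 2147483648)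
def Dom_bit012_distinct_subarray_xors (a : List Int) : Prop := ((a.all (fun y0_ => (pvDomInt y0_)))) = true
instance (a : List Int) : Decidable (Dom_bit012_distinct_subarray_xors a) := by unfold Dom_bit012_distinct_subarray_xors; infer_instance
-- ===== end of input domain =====

-- B replaces A's nested subarray scan by prefix-XOR deduplication: pairwise XORs of the
-- distinct prefix values, plus 0 exactly when a prefix value repeats (alternative algorithm;
-- same result, proved equal on all inputs).


-- ===== PORT A =====
def bit012_distinct_subarray_xors (a : List Int) : Int :=
  let n : Int := (a.length : Int)
  let s :=
    (PySem.List.pyRange 0 n 1).foldl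
      (fun (s : PySem.Set Int) i =>
        ((PySem.List.pyRange i n 1).foldl
          (fun (st : Int × PySem.Set Int) j =>
            (PySem.Int.bxor st.1 (PySem.List.pyGetD a j 0),
             st.2.add (PySem.Int.bxor st.1 (PySem.List.pyGetD a j 0))))
          ((0 : Int), s)).2)
      PySem.Set.empty
  (s.length : Int)

-- ===== PORT B =====
def bit012_distinct_subarray_xors_alt (a : List Int) : Int :=
  let prefs :=
    (a.foldl
      (fun (st : Int × PySem.Set Int) x =>
        (PySem.Int.bxor st.1 x, st.2.add (PySem.Int.bxor st.1 x)))
      ((0 : Int), PySem.Set.ofList [0])).2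
  let u : List Int := prefs
  let res :=
    (PySem.List.pyRange 0 (u.length : Int) 1).foldl
      (fun (r : PySem.Set Int) i =>
        (PySem.List.pyRange (i + 1) (u.length : Int) 1).foldl
          (fun (r : PySem.Set Int) j =>
            r.add (PySem.Int.bxor (PySem.List.pyGetD u i 0) (PySem.List.pyGetD u j 0)))
          r)
      PySem.Set.empty
  let res := if (prefs.length : Int) < (a.length : Int) + 1 then res.add 0 else res
  (res.length : Int)

-- ===== PRECONDITION & SPEC =====
def Spec_bit012_distinct_subarray_xors (a : List Int) (out : Int) : Prop := out = bit012_distinct_subarray_xors_alt a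
instance (a : List Int) (out : Int) : Decidable (Spec_bit012_distinct_subarray_xors a out) := by unfold Spec_bit012_distinct_subarray_xors; infer_instance

-- ===== CLAIM (what is proved, stated in full; the proofs are below) =====
def Claim_equal_bit012_distinct_subarray_xors : Prop := ∀ (a : List Int), Dom_bit012_distinct_subarray_xors a → Spec_bit012_distinct_subarray_xors a (bit012_distinct_subarray_xors a)

-- ===== LEMMAS AND PROOFS =====

-- Python's int `^` (PySem.Int.bxor) through a sign/magnitude encoding, to get
-- associativity.
def pvDec (s : Bool) (m : Nat) : Int := cond s (-(m : Int) - 1) (m : Int)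

lemma pvBxor_dec (s1 s2 : Bool) (m1 m2 : Nat) :
    PySem.Int.bxor (pvDec s1 m1) (pvDec s2 m2) = pvDec (xor s1 s2) (m1 ^^^ m2) := by
  cases s1 <;> cases s2 <;>
    simp [pvDec, PySem.Int.bxor] <;> omega

lemma pvDec_surj (a : Int) : ∃ s m, a = pvDec s m := by
  by_cases h : 0 ≤ a
  · exact ⟨false, a.toNat, by simp only [pvDec, cond_false]; omega⟩
  · exact ⟨true, (-a - 1).toNat, by simp only [pvDec, cond_true]; omega⟩

lemma pvBxor_assoc (a b c : Int) :
    PySem.Int.bxor (PySem.Int.bxor a b) c = PySem.Int.bxor a (PySem.Int.bxor b c) := by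
  obtain ⟨s1, m1, rfl⟩ := pvDec_surj a
  obtain ⟨s2, m2, rfl⟩ := pvDec_surj b
  obtain ⟨s3, m3, rfl⟩ := pvDec_surj c
  rw [pvBxor_dec, pvBxor_dec, pvBxor_dec, pvBxor_dec, Bool.xor_assoc, Nat.xor_assoc]

lemma pvBxor_zero_left (a : Int) : PySem.Int.bxor 0 a = a := by
  rw [PySem.Int.bxor_comm, PySem.Int.bxor_zero]

-- pvP a k = XOR of the first k elements of a (the k-th prefix-XOR value)
def pvP (a : List Int) (k : Nat) : Int := (a.take k).foldl PySem.Int.bxor 0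

lemma pvP_succ (a : List Int) (k : Nat) (h : k < a.length) :
    pvP a (k + 1) = PySem.Int.bxor (pvP a k) a[k] := by
  unfold pvP
  rw [List.take_add_one, List.getElem?_eq_getElem h, List.foldl_append]
  rfl

lemma pvFoldl_bxor_hoist (l : List Int) (v : Int) :
    l.foldl PySem.Int.bxor v = PySem.Int.bxor v (l.foldl PySem.Int.bxor 0) := by
  induction l generalizing v with
  | nil => simp [PySem.Int.bxor_zero]
  | cons y t ih =>
    simp only [List.foldl_cons]
    rw [ih (PySem.Int.bxor v y), ih (PySem.Int.bxor 0 y), pvBxor_zero_left, pvBxor_assoc]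

lemma pvSeg (a : List Int) (i m : Nat) (h : i + m ≤ a.length) :
    ((a.drop i).take m).foldl PySem.Int.bxor 0
      = PySem.Int.bxor (pvP a i) (pvP a (i + m)) := by
  induction m with
  | zero => simp [PySem.Int.bxor_self]
  | succ m ih =>
    have hm : i + m < a.length := by omega
    have hdl : m < (a.drop i).length := by simp; omega
    rw [List.take_add_one, List.getElem?_eq_getElem hdl, List.foldl_append]
    simp only [Option.toList_some, List.foldl_cons, List.foldl_nil]
    rw [ih (by omega), List.getElem_drop, pvBxor_assoc, ← pvP_succ a (i + m) hm, Nat.add_assoc]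

-- the shared loop body of A's inner loop and B's prefix loop: fold that XOR-accumulates
-- and inserts each running value into the set
lemma pvFoldAdd_mem (l : List Int) (v : Int) (s : PySem.Set Int) (x : Int) :
    x ∈ (l.foldl
          (fun (st : Int × PySem.Set Int) y =>
            (PySem.Int.bxor st.1 y, st.2.add (PySem.Int.bxor st.1 y)))
          (v, s)).2
      ↔ x ∈ s ∨ ∃ k : Nat, k < l.length ∧ x = (l.take (k + 1)).foldl PySem.Int.bxor v := by
  induction l generalizing v s with
  | nil => simp
  | cons y t ih =>
    simp only [List.foldl_cons]
    rw [ih]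
    rw [PySem.Set.mem_add]
    constructor
    · rintro ((hx | rfl) | ⟨k, hk, rfl⟩)
      · exact Or.inl hx
      · exact Or.inr ⟨0, by simp, by simp⟩
      · exact Or.inr ⟨k + 1, by simpa using hk, by simp⟩
    · rintro (hx | ⟨k, hk, rfl⟩)
      · exact Or.inl (Or.inl hx)
      · cases k with
        | zero => exact Or.inl (Or.inr (by simp))
        | succ k => exact Or.inr ⟨k, by simpa using hk, by simp⟩

lemma pvFoldAdd_nodup (l : List Int) (v : Int) (s : PySem.Set Int) (hs : s.Nodup) :
    (l.foldl
        (fun (st : Int × PySem.Set Int) y =>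
          (PySem.Int.bxor st.1 y, st.2.add (PySem.Int.bxor st.1 y)))
        (v, s)).2.Nodup := by
  induction l generalizing v s with
  | nil => exact hs
  | cons y t ih => exact ih _ _ (PySem.Set.nodup_add _ _ hs)

-- A's double loop, index ranges converted to a fold over List.range / list suffixes
lemma pvA_outer_conv (a : List Int) :
    (PySem.List.pyRange 0 (a.length : Int) 1).foldl
      (fun (s : PySem.Set Int) i =>
        ((PySem.List.pyRange i (a.length : Int) 1).foldl
          (fun (st : Int × PySem.Set Int) j =>
            (PySem.Int.bxor st.1 (PySem.List.pyGetD a j 0),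
             st.2.add (PySem.Int.bxor st.1 (PySem.List.pyGetD a j 0))))
          ((0 : Int), s)).2)
      PySem.Set.empty
    = (List.range a.length).foldl
        (fun (s : PySem.Set Int) i =>
          ((a.drop i).foldl
            (fun (st : Int × PySem.Set Int) y =>
              (PySem.Int.bxor st.1 y, st.2.add (PySem.Int.bxor st.1 y)))
            ((0 : Int), s)).2)
        PySem.Set.empty := by
  rw [PySem.List.pyRange_one, List.foldl_map]
  have hl : ((a.length : Int) - 0).toNat = a.length := by omega
  rw [hl]
  congr 1
  funext s k
  have h0 : (0 : Int) + (k : Int) = (k : Int) := by ring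
  rw [h0]
  exact congrArg Prod.snd
    (PySem.List.foldl_pyRange_pyGetD' a 0
      (fun st y => (PySem.Int.bxor st.1 y, st.2.add (PySem.Int.bxor st.1 y)))
      ((0 : Int), s) (Int.natCast_nonneg k))

-- membership in A's set: exactly the XORs of two distinct prefix positions
lemma pvAouter_mem (a : List Int) (m : Nat) (hm : m ≤ a.length) (x : Int) :
    x ∈ (List.range m).foldl
        (fun (s : PySem.Set Int) i =>
          ((a.drop i).foldl
            (fun (st : Int × PySem.Set Int) y =>
              (PySem.Int.bxor st.1 y, st.2.add (PySem.Int.bxor st.1 y)))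
            ((0 : Int), s)).2)
        PySem.Set.empty
      ↔ ∃ k l : Nat, k < m ∧ k < l ∧ l ≤ a.length ∧ x = PySem.Int.bxor (pvP a k) (pvP a l) := by
  induction m with
  | zero => simp [PySem.Set.empty]
  | succ m ih =>
    rw [List.range_succ, List.foldl_append, List.foldl_cons, List.foldl_nil,
        pvFoldAdd_mem, ih (by omega)]
    constructor
    · rintro (⟨k, l, h1, h2, h3, rfl⟩ | ⟨k, hk, rfl⟩)
      · exact ⟨k, l, by omega, h2, h3, rfl⟩
      · refine ⟨m, m + k + 1, by omega, by omega, by simp at hk; omega, ?_⟩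
        rw [pvFoldl_bxor_hoist, pvBxor_zero_left,
            pvSeg a m (k + 1) (by simp at hk; omega), ← Nat.add_assoc]
    · rintro ⟨k, l, h1, h2, h3, rfl⟩
      by_cases hkm : k < m
      · exact Or.inl ⟨k, l, hkm, h2, h3, rfl⟩
      · have hk : k = m := by omega
        subst hk
        refine Or.inr ⟨l - k - 1, by simp; omega, ?_⟩
        rw [pvFoldl_bxor_hoist, pvBxor_zero_left,
            pvSeg a k (l - k - 1 + 1) (by omega)]
        congr 2
        omega

lemma pvAouter_nodup (a : List Int) (m : Nat) :
    ((List.range m).foldl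
        (fun (s : PySem.Set Int) i =>
          ((a.drop i).foldl
            (fun (st : Int × PySem.Set Int) y =>
              (PySem.Int.bxor st.1 y, st.2.add (PySem.Int.bxor st.1 y)))
            ((0 : Int), s)).2)
        PySem.Set.empty).Nodup := by
  induction m with
  | zero => exact List.nodup_nil
  | succ m ih =>
    rw [List.range_succ, List.foldl_append, List.foldl_cons, List.foldl_nil]
    exact pvFoldAdd_nodup _ _ _ ih

-- membership in B's prefix set
lemma pvPrefs_mem (a : List Int) (x : Int) :
    x ∈ (a.foldl
          (fun (st : Int × PySem.Set Int) y =>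
            (PySem.Int.bxor st.1 y, st.2.add (PySem.Int.bxor st.1 y)))
          ((0 : Int), PySem.Set.ofList [0])).2
      ↔ ∃ k : Nat, k ≤ a.length ∧ x = pvP a k := by
  rw [pvFoldAdd_mem]
  rw [PySem.Set.mem_ofList]
  constructor
  · rintro (h | ⟨k, hk, rfl⟩)
    · refine ⟨0, by omega, ?_⟩
      simpa [pvP] using h
    · exact ⟨k + 1, by omega, rfl⟩
  · rintro ⟨k, hk, rfl⟩
    cases k with
    | zero => exact Or.inl (by simp [pvP])
    | succ k => exact Or.inr ⟨k, by omega, rfl⟩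

-- a fold over a Python range that only inserts values
lemma pvRangeAdd_mem (g : Int → Int) (hi : Int) :
    ∀ (n : Nat) (lo : Int) (r : PySem.Set Int) (x : Int), (hi - lo).toNat = n →
    (x ∈ (PySem.List.pyRange lo hi 1).foldl (fun r j => r.add (g j)) r
      ↔ x ∈ r ∨ ∃ j : Int, lo ≤ j ∧ j < hi ∧ x = g j) := by
  intro n
  induction n with
  | zero =>
    intro lo r x h
    rw [PySem.List.pyRange_one_eq_nil (by omega)]
    simp only [List.foldl_nil]
    constructor
    · exact Or.inl
    · rintro (h | ⟨j, h1, h2, rfl⟩)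
      · exact h
      · omega
  | succ n ih =>
    intro lo r x h
    rw [PySem.List.pyRange_one_cons (by omega), List.foldl_cons,
        ih (lo + 1) _ x (by omega), PySem.Set.mem_add]
    constructor
    · rintro ((h | rfl) | ⟨j, h1, h2, rfl⟩)
      · exact Or.inl h
      · exact Or.inr ⟨lo, by omega, by omega, rfl⟩
      · exact Or.inr ⟨j, by omega, h2, rfl⟩
    · rintro (h | ⟨j, h1, h2, rfl⟩)
      · exact Or.inl (Or.inl h)
      · by_cases hj : j = lo
        · subst hj; exact Or.inl (Or.inr rfl)
        · exact Or.inr ⟨j, by omega, h2, rfl⟩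

lemma pvRangeAdd_nodup (g : Int → Int) (hi : Int) :
    ∀ (n : Nat) (lo : Int) (r : PySem.Set Int), (hi - lo).toNat = n → r.Nodup →
    ((PySem.List.pyRange lo hi 1).foldl (fun r j => r.add (g j)) r).Nodup := by
  intro n
  induction n with
  | zero =>
    intro lo r h hr
    rw [PySem.List.pyRange_one_eq_nil (by omega)]
    exact hr
  | succ n ih =>
    intro lo r h hr
    rw [PySem.List.pyRange_one_cons (by omega), List.foldl_cons]
    exact ih (lo + 1) _ (by omega) (PySem.Set.nodup_add _ _ hr)

-- B's pairwise double loop, outer range converted to List.range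
lemma pvPairs_conv (u : List Int) :
    (PySem.List.pyRange 0 (u.length : Int) 1).foldl
      (fun (r : PySem.Set Int) i =>
        (PySem.List.pyRange (i + 1) (u.length : Int) 1).foldl
          (fun (r : PySem.Set Int) j =>
            r.add (PySem.Int.bxor (PySem.List.pyGetD u i 0) (PySem.List.pyGetD u j 0)))
          r)
      PySem.Set.empty
    = (List.range u.length).foldl
        (fun (r : PySem.Set Int) (i : Nat) =>
          (PySem.List.pyRange ((i : Int) + 1) (u.length : Int) 1).foldl
            (fun (r : PySem.Set Int) j =>
              r.add (PySem.Int.bxor (PySem.List.pyGetD u (i : Int) 0) (PySem.List.pyGetD u j 0)))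
            r)
        PySem.Set.empty := by
  rw [PySem.List.pyRange_one, List.foldl_map]
  have hl : ((u.length : Int) - 0).toNat = u.length := by omega
  rw [hl]
  congr 1
  funext r k
  norm_num

-- membership in B's pairwise set: XORs of two elements at distinct positions of u
lemma pvPairsAux_mem (u : List Int) :
    ∀ (m : Nat), m ≤ u.length → ∀ (x : Int),
    (x ∈ (List.range m).foldl
        (fun (r : PySem.Set Int) (i : Nat) =>
          (PySem.List.pyRange ((i : Int) + 1) (u.length : Int) 1).foldl
            (fun (r : PySem.Set Int) j =>
              r.add (PySem.Int.bxor (PySem.List.pyGetD u (i : Int) 0) (PySem.List.pyGetD u j 0)))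
            r)
        PySem.Set.empty
      ↔ ∃ p q : Nat, p < m ∧ p < q ∧ q < u.length ∧
          (∀ (hp : p < u.length) (hq : q < u.length), x = PySem.Int.bxor u[p] u[q])) := by
  intro m
  induction m with
  | zero => intro _ x; simp [PySem.Set.empty]
  | succ m ih =>
    intro hm x
    rw [List.range_succ, List.foldl_append, List.foldl_cons, List.foldl_nil,
        pvRangeAdd_mem _ _ (((u.length : Int) - ((m : Int) + 1)).toNat) _ _ x rfl,
        ih (by omega) x]
    constructor
    · rintro (⟨p, q, h1, h2, h3, h4⟩ | ⟨j, h1, h2, rfl⟩)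
      · exact ⟨p, q, by omega, h2, h3, h4⟩
      · refine ⟨m, j.toNat, by omega, by omega, by omega, ?_⟩
        intro hp hq
        rw [PySem.List.pyGetD_eq_getElem u (0 : Int) (by omega) (by omega),
            PySem.List.pyGetD_eq_getElem u (0 : Int) (by omega) (by omega)]
        congr 1
    · rintro ⟨p, q, h1, h2, h3, h4⟩
      by_cases hpm : p < m
      · exact Or.inl ⟨p, q, hpm, h2, h3, h4⟩
      · have hp : p = m := by omega
        subst hp
        refine Or.inr ⟨(q : Int), by omega, by omega, ?_⟩
        rw [PySem.List.pyGetD_eq_getElem u (0 : Int) (by omega) (by omega),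
            PySem.List.pyGetD_eq_getElem u (0 : Int) (by omega) (by omega)]
        simpa using h4 (by omega) h3

lemma pvPairsAux_nodup (u : List Int) :
    ∀ (m : Nat),
    ((List.range m).foldl
        (fun (r : PySem.Set Int) (i : Nat) =>
          (PySem.List.pyRange ((i : Int) + 1) (u.length : Int) 1).foldl
            (fun (r : PySem.Set Int) j =>
              r.add (PySem.Int.bxor (PySem.List.pyGetD u (i : Int) 0) (PySem.List.pyGetD u j 0)))
            r)
        PySem.Set.empty).Nodup := by
  intro m
  induction m with
  | zero => exact List.nodup_nil
  | succ m ih =>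
    rw [List.range_succ, List.foldl_append, List.foldl_cons, List.foldl_nil]
    exact pvRangeAdd_nodup _ _ _ _ _ rfl ih

-- two Nodup lists with the same members have the same length
lemma pvNodup_len_eq (s t : List Int) (hs : s.Nodup) (ht : t.Nodup)
    (h : ∀ x, x ∈ s ↔ x ∈ t) : s.length = t.length := by
  rw [← List.toFinset_card_of_nodup hs, ← List.toFinset_card_of_nodup ht]
  congr 1
  ext x
  simp only [List.mem_toFinset]
  exact h x

lemma pvLen_eq_card (s : List Int) (t : List Int) (hs : s.Nodup)
    (h : ∀ x, x ∈ s ↔ x ∈ t) : s.length = t.dedup.length := by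
  rw [← List.toFinset_card_of_nodup hs, ← List.card_toFinset]
  congr 1
  ext x
  simp only [List.mem_toFinset]
  exact h x

-- the prefix set is smaller than n+1 exactly when some prefix value repeats
lemma pvDup_iff (a : List Int) (prefs : PySem.Set Int) (hnd : prefs.Nodup)
    (hmem : ∀ x, x ∈ prefs ↔ ∃ k : Nat, k ≤ a.length ∧ x = pvP a k) :
    prefs.length < a.length + 1 ↔
      ∃ k l : Nat, k < l ∧ l ≤ a.length ∧ pvP a k = pvP a l := by
  set L : List Int := (List.range (a.length + 1)).map (pvP a) with hL
  have hmem' : ∀ x, x ∈ prefs ↔ x ∈ L := by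
    intro x
    rw [hmem, hL]
    simp only [List.mem_map, List.mem_range]
    constructor
    · rintro ⟨k, h1, rfl⟩; exact ⟨k, by omega, rfl⟩
    · rintro ⟨k, h1, rfl⟩; exact ⟨k, by omega, rfl⟩
  have hlen : prefs.length = L.dedup.length := pvLen_eq_card _ _ hnd hmem'
  have hLlen : L.length = a.length + 1 := by simp [hL]
  have hnodup_iff : ¬ L.Nodup ↔ ∃ k l : Nat, k < l ∧ l ≤ a.length ∧ pvP a k = pvP a l := by
    rw [List.Nodup, hL, List.pairwise_map]
    rw [List.pairwise_iff_getElem]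
    push Not
    constructor
    · rintro ⟨i, j, hi, hj, hij, hne⟩
      simp only [List.getElem_range] at hne
      simp only [List.length_range] at hi hj
      exact ⟨i, j, hij, by omega, by simpa using hne⟩
    · rintro ⟨k, l, h1, h2, h3⟩
      refine ⟨k, l, by simp; omega, by simp; omega, h1, ?_⟩
      simpa using h3
  rw [hlen]
  constructor
  · intro hlt
    rw [← hnodup_iff]
    intro hnodup
    rw [hnodup.dedup, hLlen] at hlt
    omega
  · intro hex
    have hnotnodup : ¬ L.Nodup := hnodup_iff.mpr hex
    have hle : L.dedup.length ≤ L.length := (List.dedup_sublist L).length_le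
    rcases lt_or_eq_of_le hle with h | h
    · omega
    · exfalso
      have := (List.dedup_sublist L).eq_of_length h
      rw [← this] at hnotnodup
      exact hnotnodup (List.nodup_dedup L)

-- the value-level bridge between A's description and B's description
lemma pvBridge (a : List Int) (u : List Int) (hnd : u.Nodup)
    (hmem : ∀ x, x ∈ u ↔ ∃ k : Nat, k ≤ a.length ∧ x = pvP a k) (x : Int) :
    (∃ k l : Nat, k < l ∧ l ≤ a.length ∧ x = PySem.Int.bxor (pvP a k) (pvP a l)) ↔
      ((∃ p q : Nat, p < q ∧ q < u.length ∧
          (∀ (hp : p < u.length) (hq : q < u.length), x = PySem.Int.bxor u[p] u[q]))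
        ∨ (x = 0 ∧ ∃ k l : Nat, k < l ∧ l ≤ a.length ∧ pvP a k = pvP a l)) := by
  constructor
  · rintro ⟨k, l, h1, h2, rfl⟩
    by_cases heq : pvP a k = pvP a l
    · right
      exact ⟨by rw [heq, PySem.Int.bxor_self], k, l, h1, h2, heq⟩
    · left
      have hk : pvP a k ∈ u := (hmem _).mpr ⟨k, by omega, rfl⟩
      have hl : pvP a l ∈ u := (hmem _).mpr ⟨l, h2, rfl⟩
      obtain ⟨p, hp, hup⟩ := List.getElem_of_mem hk
      obtain ⟨q, hq, huq⟩ := List.getElem_of_mem hl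
      have hpq : p ≠ q := by
        intro h
        subst h
        exact heq (hup.symm.trans huq)
      rcases Nat.lt_or_ge p q with hlt | hge
      · exact ⟨p, q, hlt, hq, fun _ _ => by rw [hup, huq]⟩
      · have hlt : q < p := by omega
        exact ⟨q, p, hlt, hp, fun _ _ => by rw [hup, huq, PySem.Int.bxor_comm]⟩
  · rintro (⟨p, q, h1, h2, h3⟩ | ⟨rfl, k, l, h1, h2, h3⟩)
    · have hp : p < u.length := by omega
      obtain ⟨k, hk, hpk⟩ := (hmem u[p]).mp (List.getElem_mem hp)
      obtain ⟨l, hl, hql⟩ := (hmem u[q]).mp (List.getElem_mem h2)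
      have hne : u[p] ≠ u[q] := by
        intro h
        exact absurd ((hnd.getElem_inj_iff).mp h) (by omega)
      have hkl : k ≠ l := by
        intro h
        apply hne
        rw [hpk, hql, h]
      rcases Nat.lt_or_ge k l with hlt | hge
      · exact ⟨k, l, hlt, hl, by rw [h3 hp h2, hpk, hql]⟩
      · exact ⟨l, k, by omega, hk, by rw [h3 hp h2, hpk, hql, PySem.Int.bxor_comm]⟩
    · exact ⟨k, l, h1, h2, by rw [h3, PySem.Int.bxor_self]⟩

-- ===== VERDICT (by name: the statement is the Claim_ definition above) =====
theorem bit012_distinct_subarray_xors_spec : Claim_equal_bit012_distinct_subarray_xors := by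
  intro a _
  unfold Spec_bit012_distinct_subarray_xors
  unfold bit012_distinct_subarray_xors bit012_distinct_subarray_xors_alt
  simp only []
  set prefs := (a.foldl
      (fun (st : Int × PySem.Set Int) y =>
        (PySem.Int.bxor st.1 y, st.2.add (PySem.Int.bxor st.1 y)))
      ((0 : Int), PySem.Set.ofList [0])).2 with hprefs
  have hprefs_mem : ∀ x, x ∈ prefs ↔ ∃ k : Nat, k ≤ a.length ∧ x = pvP a k := pvPrefs_mem a
  have hprefs_nd : prefs.Nodup := pvFoldAdd_nodup _ _ _ (PySem.Set.nodup_ofList _)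
  rw [pvA_outer_conv, pvPairs_conv]
  set SA := (List.range a.length).foldl
      (fun (s : PySem.Set Int) i =>
        ((a.drop i).foldl
          (fun (st : Int × PySem.Set Int) y =>
            (PySem.Int.bxor st.1 y, st.2.add (PySem.Int.bxor st.1 y)))
          ((0 : Int), s)).2)
      PySem.Set.empty with hSA
  set R := (List.range prefs.length).foldl
      (fun (r : PySem.Set Int) (i : Nat) =>
        (PySem.List.pyRange ((i : Int) + 1) (prefs.length : Int) 1).foldl
          (fun (r : PySem.Set Int) j =>
            r.add (PySem.Int.bxor (PySem.List.pyGetD prefs (i : Int) 0) (PySem.List.pyGetD prefs j 0)))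
          r)
      PySem.Set.empty with hR
  have hR_mem : ∀ x, x ∈ R ↔ ∃ p q : Nat, p < q ∧ q < prefs.length ∧
      (∀ (hp : p < prefs.length) (hq : q < prefs.length), x = PySem.Int.bxor prefs[p] prefs[q]) := by
    intro x
    rw [hR, pvPairsAux_mem prefs prefs.length (le_refl _) x]
    constructor
    · rintro ⟨p, q, _, h2, h3, h4⟩; exact ⟨p, q, h2, h3, h4⟩
    · rintro ⟨p, q, h2, h3, h4⟩; exact ⟨p, q, by omega, h2, h3, h4⟩
  have hR_nd : R.Nodup := pvPairsAux_nodup prefs prefs.length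
  have hSA_mem : ∀ x, x ∈ SA ↔ ∃ k l : Nat, k < l ∧ l ≤ a.length ∧
      x = PySem.Int.bxor (pvP a k) (pvP a l) := by
    intro x
    rw [hSA, pvAouter_mem a a.length (le_refl _) x]
    constructor
    · rintro ⟨k, l, _, h2, h3, h4⟩; exact ⟨k, l, h2, h3, h4⟩
    · rintro ⟨k, l, h2, h3, h4⟩; exact ⟨k, l, by omega, h2, h3, h4⟩
  have hSA_nd : SA.Nodup := pvAouter_nodup a a.length
  have hdup := pvDup_iff a prefs hprefs_nd hprefs_mem
  by_cases hcond : (prefs.length : Int) < (a.length : Int) + 1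
  · rw [if_pos hcond]
    have hdupN : ∃ k l : Nat, k < l ∧ l ≤ a.length ∧ pvP a k = pvP a l :=
      hdup.mp (by omega)
    have : SA.length = (R.add 0).length := by
      apply pvNodup_len_eq _ _ hSA_nd (PySem.Set.nodup_add _ _ hR_nd)
      intro x
      rw [PySem.Set.mem_add, hSA_mem, hR_mem,
          pvBridge a prefs hprefs_nd hprefs_mem x]
      constructor
      · rintro (h | ⟨rfl, _⟩)
        · exact Or.inl h
        · exact Or.inr rfl
      · rintro (h | rfl)
        · exact Or.inl h
        · exact Or.inr ⟨rfl, hdupN⟩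
    exact_mod_cast this
  · rw [if_neg hcond]
    have hnodupN : ¬ ∃ k l : Nat, k < l ∧ l ≤ a.length ∧ pvP a k = pvP a l := by
      rw [← hdup]; omega
    have : SA.length = R.length := by
      apply pvNodup_len_eq _ _ hSA_nd hR_nd
      intro x
      rw [hSA_mem, hR_mem, pvBridge a prefs hprefs_nd hprefs_mem x]
      constructor
      · rintro (h | ⟨rfl, hdup'⟩)
        · exact h
        · exact absurd hdup' hnodupN
      · exact Or.inl
    exact_mod_cast this
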